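-- pv_equiv track=rewrite | github.com/miagarvey/weekly-skate | utils/security.py | sanitize_message_content
-- ===== SOURCE A (Python) =====
-- def sanitize_message_content(message: str) -> str:
--     """
--     Sanitize message content to prevent XSS and other attacks
--
--     Args:
--         message: Raw message content
--
--     Returns:
--         Sanitized message content
--     """
--     if not message:
--         return ""
--
--     # Remove potentially dangerous characters
--     dangerous_chars = ['<', '>', '"', "'", '&', '\x00', '\r']
--     sanitized = message
--
--     for char in dangerous_chars:
--         sanitized = sanitized.replace(char, '')
--
--     # Limit length to prevent abuse
--     max_length = 1600  # SMS max length
--     if len(sanitized) > max_length: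
--         sanitized = sanitized[:max_length]
--
--     return sanitized.strip()
-- ===== SOURCE B (Python) =====
-- DANGEROUS = {'<', '>', '"', "'", '&', '\x00', '\r'}
--
--
-- def sanitize_message_content(message: str) -> str:
--     if not message:
--         return ""
--     sanitized = ''.join(c for c in message if c not in DANGEROUS)
--     max_length = 1600  # SMS max length
--     if len(sanitized) > max_length:
--         sanitized = sanitized[:max_length]
--     return sanitized.strip()
-- ===== Notes on version B (the rewrite author's own statement) =====
-- stated objective: simpler
-- what changed: Replaces the seven successive full-string .replace passes with a single character-filtering pass over the message using a set of dangerous characters; the guard, truncation and strip are unchanged.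
import Mathlib
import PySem

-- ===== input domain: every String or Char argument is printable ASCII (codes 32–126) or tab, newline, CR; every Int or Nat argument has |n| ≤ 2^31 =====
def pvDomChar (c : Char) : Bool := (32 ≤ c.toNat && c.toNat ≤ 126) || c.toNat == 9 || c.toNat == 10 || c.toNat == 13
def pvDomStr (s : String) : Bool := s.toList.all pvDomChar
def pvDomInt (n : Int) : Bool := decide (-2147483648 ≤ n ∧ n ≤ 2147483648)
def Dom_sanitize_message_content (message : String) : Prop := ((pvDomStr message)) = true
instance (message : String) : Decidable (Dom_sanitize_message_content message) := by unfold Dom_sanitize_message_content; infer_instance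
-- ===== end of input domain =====

-- B replaces A's seven successive .replace passes with a single character-filter pass; same guard, truncation and strip.


-- ===== PORT A =====
def sanitize_message_content (message : String) : String :=
  if message = "" then ""
  else
    let dangerous_chars : List String := ["<", ">", "\"", "'", "&", "\x00", "\r"]
    let sanitized := dangerous_chars.foldl (fun s ch => PySem.Str.replace s ch "") message
    let max_length : Int := 1600
    let sanitized := if max_length < PySem.Str.len sanitized
                     then PySem.Str.slice sanitized none (some max_length) else sanitized
    PySem.Str.strip sanitized

-- ===== PORT B =====
def pvDangerous : PySem.Set Char := PySem.Set.ofList ['<', '>', '"', '\'', '&', '\x00', '\r']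

def sanitize_message_content_alt (message : String) : String :=
  if message = "" then ""
  else
    let sanitized := String.ofList (message.toList.filter (fun c => !(pvDangerous.contains c)))
    let max_length : Int := 1600
    let sanitized := if max_length < PySem.Str.len sanitized
                     then PySem.Str.slice sanitized none (some max_length) else sanitized
    PySem.Str.strip sanitized

-- ===== PRECONDITION & SPEC =====
def Spec_sanitize_message_content (message : String) (out : String) : Prop := out = sanitize_message_content_alt message
instance (message : String) (out : String) : Decidable (Spec_sanitize_message_content message out) := by unfold Spec_sanitize_message_content; infer_instance

-- ===== CLAIM (what is proved, stated in full; the proofs are below) =====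
def Claim_equal_sanitize_message_content : Prop := ∀ (message : String), Dom_sanitize_message_content message → Spec_sanitize_message_content message (sanitize_message_content message)

-- ===== LEMMAS AND PROOFS =====

-- replacing one single character by the empty string is exactly filtering it out
theorem pv_go_filter (c : Char) (l : List Char) : ∀ fuel acc, l.length ≤ fuel →
    PySem.Chars.replace.go [c] [] fuel l acc = acc.reverse ++ l.filter (· ≠ c) := by
  induction l with
  | nil => intro fuel acc h; cases fuel <;> simp [PySem.Chars.replace.go]
  | cons x xs ih =>
    intro fuel acc h
    cases fuel with
    | zero => simp at h
    | succ n =>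
      simp only [PySem.Chars.replace.go]
      by_cases hx : x = c
      · subst hx
        rw [if_pos (by simp [List.isPrefixOf])]
        simp only [List.length_singleton, List.drop_succ_cons, List.drop_zero,
          List.reverse_nil, List.nil_append]
        rw [ih n acc (by simp at h; omega)]
        simp [List.filter]
      · rw [if_neg (by simp [List.isPrefixOf]; exact fun hh => hx hh.symm)]
        rw [ih n (x :: acc) (by simp at h; omega)]
        simp [List.filter, hx]

theorem pv_replace_filter (c : Char) (s : List Char) :
    PySem.Chars.replace s [c] [] = s.filter (· ≠ c) := by
  simp [PySem.Chars.replace, pv_go_filter c s s.length [] le_rfl]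

-- the seven serial filters coincide with B's single set-membership filter
theorem pv_chain_eq (l : List Char) :
    ((((((l.filter (· ≠ '<')).filter (· ≠ '>')).filter (· ≠ '"')).filter
        (· ≠ '\'')).filter (· ≠ '&')).filter (· ≠ '\x00')).filter (· ≠ '\r')
      = l.filter (fun c => !(pvDangerous.contains c)) := by
  simp only [List.filter_filter]
  refine List.filter_congr (fun c _ => ?_)
  simp [pvDangerous, PySem.Set.contains, PySem.Set.ofList]
  by_cases h1 : c = '<' <;> by_cases h2 : c = '>' <;> by_cases h3 : c = '"' <;>
    by_cases h4 : c = '\'' <;> by_cases h5 : c = '&' <;> by_cases h6 : c = '\x00' <;>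
    by_cases h7 : c = '\r' <;> simp_all

theorem pv_core_eq (message : String) :
    (["<", ">", "\"", "'", "&", "\x00", "\r"] : List String).foldl
        (fun s ch => PySem.Str.replace s ch "") message
      = String.ofList (message.toList.filter (fun c => !(pvDangerous.contains c))) := by
  apply String.toList_inj.mp
  simp only [List.foldl_cons, List.foldl_nil, PySem.Str.toList_replace]
  simp only [show ("<" : String).toList = ['<'] from rfl, show (">" : String).toList = ['>'] from rfl,
    show ("\"" : String).toList = ['"'] from rfl, show ("'" : String).toList = ['\''] from rfl,
    show ("&" : String).toList = ['&'] from rfl, show ("\x00" : String).toList = ['\x00'] from rfl,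
    show ("\r" : String).toList = ['\r'] from rfl, show ("" : String).toList = [] from rfl]
  simp only [pv_replace_filter]
  rw [pv_chain_eq, String.toList_ofList]

-- ===== VERDICT (by name: the statement is the Claim_ definition above) =====
theorem sanitize_message_content_spec : Claim_equal_sanitize_message_content := by
  intro message _
  unfold Spec_sanitize_message_content sanitize_message_content sanitize_message_content_alt
  by_cases h : message = ""
  · simp [h]
  · simp only [if_neg h]
    rw [pv_core_eq message]
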